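-- pv_equiv track=rewrite | github.com/DmitrievYK/python_lessons | seminar004_2.py | get_symb
-- ===== SOURCE A (Python) =====
-- def get_symb(some_str: str) -> str:
--     result = ""
--     input_str = some_str.split()
--     count_dict = {}
--
--     for item in input_str:
--         if item in count_dict:
--             count_dict[item] += 1
--             result += f"{item}_{count_dict[item]} "
--         else:
--             count_dict[item] = 0
--             result += f"{item} "
--     return result
-- ===== SOURCE B (Python) =====
-- def get_symb(some_str: str) -> str:
--     words = some_str.split()
--     piece = {}
--     for w in dict.fromkeys(words):
--         idxs = [i for i, x in enumerate(words) if x == w]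
--         for k, i in enumerate(idxs):
--             piece[i] = f"{w} " if k == 0 else f"{w}_{k} "
--     return "".join(piece[i] for i in range(len(words)))
-- ===== Notes on version B (the rewrite author's own statement) =====
-- stated objective: alternative
-- what changed: B replaces A's single emit-as-you-go pass with a running counter dict by a group-and-scatter algorithm: it iterates the distinct words, gathers each word's occurrence positions by scanning the word list, assigns each occurrence its rank within its group, scatters the formatted pieces into a position-indexed map out of order, and finally reads the pieces back in position order and joins them.
import Mathlib
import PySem

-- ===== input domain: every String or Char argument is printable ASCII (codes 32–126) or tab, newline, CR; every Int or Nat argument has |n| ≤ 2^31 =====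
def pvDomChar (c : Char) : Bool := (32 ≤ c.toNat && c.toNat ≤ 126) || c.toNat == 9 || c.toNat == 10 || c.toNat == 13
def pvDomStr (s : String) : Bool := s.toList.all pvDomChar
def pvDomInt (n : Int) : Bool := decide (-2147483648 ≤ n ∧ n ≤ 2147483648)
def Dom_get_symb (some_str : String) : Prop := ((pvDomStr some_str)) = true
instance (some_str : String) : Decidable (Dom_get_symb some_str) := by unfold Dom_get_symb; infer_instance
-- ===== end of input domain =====

-- B replaces A's single pass with a running-counter dict by group-and-scatter: gather each distinct
-- word's positions, rank them within the group, scatter formatted pieces into a position-keyed map,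
-- read back in order (alternative decomposition, same result).

-- ===== PORT A =====
def get_symb (some_str : String) : String :=
  let input_str := PySem.Str.split₀ some_str
  let res := input_str.foldl (fun (st : String × PySem.Dict String Int) item =>
    if st.2.contains item then
      let d := st.2.modify item 0 (· + 1)
      (st.1 ++ item ++ "_" ++ PySem.Int.toStr (d.getD item 0) ++ " ", d)
    else
      (st.1 ++ item ++ " ", st.2.insert item 0)) ("", PySem.Dict.empty)
  res.1

-- ===== PORT B =====
-- piece[i] in Python raises KeyError on a missing key; every i in range(len(words)) is a key by
-- construction, so the lookup is ported as getD with an irrelevant default.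
def get_symb_alt (some_str : String) : String :=
  let words := PySem.Str.split₀ some_str
  let piece := (PySem.List.dedup words).foldl (fun (d : PySem.Dict Int String) w =>
    let idxs := ((PySem.List.enumerate words 0).filter (fun p => p.2 == w)).map (·.1)
    (PySem.List.enumerate idxs 0).foldl (fun d q =>
      d.insert q.2 (if q.1 = 0 then w ++ " " else w ++ "_" ++ PySem.Int.toStr q.1 ++ " ")) d)
    PySem.Dict.empty
  PySem.Str.join "" ((PySem.List.pyRange 0 (words.length : Int) 1).map (fun i => piece.getD i ""))

-- ===== PRECONDITION & SPEC =====
def Spec_get_symb (some_str : String) (out : String) : Prop := out = get_symb_alt some_str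
instance (some_str : String) (out : String) : Decidable (Spec_get_symb some_str out) := by unfold Spec_get_symb; infer_instance

-- ===== CLAIM (what is proved, stated in full; the proofs are below) =====
def Claim_equal_get_symb : Prop := ∀ (some_str : String), Dom_get_symb some_str → Spec_get_symb some_str (get_symb some_str)

-- ===== LEMMAS AND PROOFS =====

-- the string piece emitted for word x after processed prefix p
def pvEmit (p : List String) (x : String) : String :=
  if p.count x = 0 then x ++ " " else x ++ "_" ++ PySem.Int.toStr ((p.count x : Nat) : Int) ++ " "

-- reference fold A's loop is reduced to
def pvSpecFold (p l : List String) (s : String) : String :=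
  match l with
  | [] => s
  | x :: xs => pvSpecFold (p ++ [x]) xs (s ++ pvEmit p x)

-- the positions (0-based) at which w occurs in l
def pvOcc (l : List String) (w : String) : List Nat :=
  match l with
  | [] => []
  | x :: xs => (if x = w then [0] else []) ++ (pvOcc xs w).map (· + 1)

lemma pvA_loop (l : List String) : ∀ (p : List String) (d : PySem.Dict String Int) (s : String),
    (∀ w, d.contains w = true ↔ p.count w ≠ 0) →
    (∀ w, p.count w ≠ 0 → d.getD w 0 = (p.count w : Int) - 1) →
    (l.foldl (fun (st : String × PySem.Dict String Int) item =>
      if st.2.contains item then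
        let d := st.2.modify item 0 (· + 1)
        (st.1 ++ item ++ "_" ++ PySem.Int.toStr (d.getD item 0) ++ " ", d)
      else
        (st.1 ++ item ++ " ", st.2.insert item 0)) (s, d)).1 = pvSpecFold p l s := by
  induction l with
  | nil => intro p d s _ _; simp [pvSpecFold]
  | cons x xs ih =>
    intro p d s hc hd
    simp only [List.foldl_cons]
    by_cases hx : d.contains x = true
    · have hcount : p.count x ≠ 0 := (hc x).1 hx
      rw [if_pos hx]
      rw [ih (p ++ [x])]
      · rw [PySem.Dict.getD_modify_self, hd x hcount,
          show (p.count x : Int) - 1 + 1 = (p.count x : Int) from by ring]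
        simp [pvSpecFold, pvEmit, hcount, String.append_assoc]
      · intro w
        rw [PySem.Dict.contains_modify]
        by_cases hwx : w = x
        · subst hwx; simp [List.count_append]
        · have h1 : List.count w [x] = 0 := by simp [List.count_eq_zero, hwx]
          simp [show (w == x) = false from by simp [hwx], hc w, List.count_append, h1]
      · intro w hw
        rw [PySem.Dict.getD_modify]
        by_cases hwx : w = x
        · subst hwx
          rw [if_pos rfl, hd _ hcount]
          simp [List.count_append]
        · rw [if_neg hwx]
          have h1 : List.count w [x] = 0 := by simp [List.count_eq_zero, hwx]
          have h2 : p.count w ≠ 0 := by simpa [List.count_append, h1] using hw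
          rw [hd w h2]
          simp [List.count_append, h1]
    · have hcount : p.count x = 0 := by
        by_contra h
        exact hx ((hc x).2 h)
      rw [if_neg hx]
      rw [ih (p ++ [x])]
      · simp [pvSpecFold, pvEmit, hcount, String.append_assoc]
      · intro w
        rw [PySem.Dict.contains_insert]
        by_cases hwx : w = x
        · subst hwx; simp [List.count_append]
        · have h1 : List.count w [x] = 0 := by simp [List.count_eq_zero, hwx]
          simp [show (w == x) = false from by simp [hwx], hc w, List.count_append, h1]
      · intro w hw
        rw [PySem.Dict.getD_insert]
        by_cases hwx : w = x
        · subst hwx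
          simp [List.count_append, hcount]
        · rw [if_neg hwx]
          have h1 : List.count w [x] = 0 := by simp [List.count_eq_zero, hwx]
          have h2 : p.count w ≠ 0 := by simpa [List.count_append, h1] using hw
          rw [hd w h2]
          simp [List.count_append, h1]

lemma pvCharsJoin_empty_append (a b : List (List Char)) :
    PySem.Chars.join [] (a ++ b) = PySem.Chars.join [] a ++ PySem.Chars.join [] b := by
  induction a with
  | nil => simp [PySem.Chars.join_nil]
  | cons x xs ih =>
    cases xs with
    | nil =>
      cases b with
      | nil => simp [PySem.Chars.join_singleton, PySem.Chars.join_nil]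
      | cons y ys => simp [PySem.Chars.join_cons_cons, PySem.Chars.join_singleton]
    | cons z zs =>
      simp only [List.cons_append, PySem.Chars.join_cons_cons]
      rw [show z :: (zs ++ b) = (z :: zs) ++ b from rfl, ih]
      simp [List.append_assoc]

lemma pvJoin_cons (x : String) (xs : List String) :
    PySem.Str.join "" (x :: xs) = x ++ PySem.Str.join "" xs := by
  have := pvCharsJoin_empty_append [x.toList] (xs.map String.toList)
  simp only [PySem.Chars.join_singleton, List.singleton_append] at this
  simp [PySem.Str.join, this]

-- structural-to-indexed form of the emitted pieces
lemma pvSpecFold_eq (l : List String) : ∀ (p : List String) (s : String),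
    pvSpecFold p l s = s ++ PySem.Str.join "" ((List.range l.length).map
      (fun k => pvEmit (p ++ l.take k) (l.getD k ""))) := by
  induction l with
  | nil => intro p s; simp [pvSpecFold, PySem.Str.join, PySem.Chars.join_nil]
  | cons x xs ih =>
    intro p s
    rw [show pvSpecFold p (x :: xs) s = pvSpecFold (p ++ [x]) xs (s ++ pvEmit p x) from rfl, ih]
    rw [List.length_cons, List.range_succ_eq_map, List.map_cons, pvJoin_cons, List.map_map]
    simp only [Function.comp_def, List.take_succ_cons, List.getD_cons_succ, List.take_zero,
      List.append_nil, List.getD_cons_zero]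
    rw [show (fun k => pvEmit (p ++ x :: xs.take k) (xs.getD k "")) =
          (fun k => pvEmit ((p ++ [x]) ++ xs.take k) (xs.getD k "")) from by
        funext k; simp, String.append_assoc]

lemma pvOcc_spec (w : String) (l : List String) : ∀ (k : Nat) (j : Nat),
    (pvOcc l w)[k]? = some j → l.getD j "" = w ∧ (l.take j).count w = k := by
  induction l with
  | nil => intro k j h; simp [pvOcc] at h
  | cons x xs ih =>
    intro k j h
    by_cases hx : x = w
    · rw [show pvOcc (x :: xs) w = 0 :: (pvOcc xs w).map (· + 1) from by simp [pvOcc, hx]] at h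
      cases k with
      | zero =>
        rw [List.getElem?_cons_zero, Option.some.injEq] at h
        subst h; simp [hx]
      | succ k =>
        rw [List.getElem?_cons_succ, List.getElem?_map] at h
        cases hj : (pvOcc xs w)[k]? with
        | none => rw [hj] at h; simp at h
        | some j' =>
          rw [hj] at h
          simp only [Option.map_some, Option.some.injEq] at h
          subst h
          obtain ⟨h1, h2⟩ := ih k j' hj
          exact ⟨by simpa using h1, by simp [h2, hx]⟩
    · rw [show pvOcc (x :: xs) w = (pvOcc xs w).map (· + 1) from by simp [pvOcc, hx]] at h
      rw [List.getElem?_map] at h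
      cases hj : (pvOcc xs w)[k]? with
      | none => rw [hj] at h; simp at h
      | some j' =>
        rw [hj] at h
        simp only [Option.map_some, Option.some.injEq] at h
        subst h
        obtain ⟨h1, h2⟩ := ih k j' hj
        refine ⟨by simpa using h1, ?_⟩
        rw [show (x :: xs).take (j' + 1) = x :: xs.take j' from by simp, List.count_cons, h2]
        simp [hx, Ne.symm]

lemma pvOcc_mem (w : String) (l : List String) : ∀ (i : Nat),
    i ∈ pvOcc l w ↔ i < l.length ∧ l.getD i "" = w := by
  induction l with
  | nil => intro i; simp [pvOcc]
  | cons x xs ih =>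
    intro i
    cases i with
    | zero =>
      by_cases hx : x = w <;> simp [pvOcc, hx]
    | succ i =>
      by_cases hx : x = w <;> simp [pvOcc, hx, ih i]

-- the comprehension in B computes exactly pvOcc (as Ints)
lemma pvIdxs_eq (w : String) (l : List String) : ∀ (a : Int),
    ((PySem.List.enumerate l a).filter (fun p => p.2 == w)).map (·.1)
      = (pvOcc l w).map (fun (j : Nat) => a + (j : Int)) := by
  induction l with
  | nil => intro a; simp [PySem.List.enumerate_nil, pvOcc]
  | cons x xs ih =>
    intro a
    rw [PySem.List.enumerate_cons]
    by_cases hx : x = w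
    · rw [show pvOcc (x :: xs) w = 0 :: (pvOcc xs w).map (· + 1) from by simp [pvOcc, hx],
        List.filter_cons_of_pos (by simp [hx]), List.map_cons, ih (a + 1),
        List.map_cons, List.map_map]
      refine congrArg₂ _ (by simp) ?_
      apply List.map_congr_left
      intro j _
      simp only [Function.comp_apply]
      push_cast; ring
    · rw [show pvOcc (x :: xs) w = (pvOcc xs w).map (· + 1) from by simp [pvOcc, hx],
        List.filter_cons_of_neg (by simp [hx]), ih (a + 1), List.map_map]
      apply List.map_congr_left
      intro j _
      simp only [Function.comp_apply]
      push_cast; ring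

-- a fold of inserts whose values depend only on the key, read back
lemma pvFoldlInsert_get? (g : Int → String) (F : Int × Int → String) :
    ∀ (L : List (Int × Int)) (d : PySem.Dict Int String) (i : Int),
    (∀ q ∈ L, F q = g q.2) →
    (L.foldl (fun d q => d.insert q.2 (F q)) d).get? i
      = if i ∈ L.map (·.2) then some (g i) else d.get? i := by
  intro L
  induction L with
  | nil => intro d i _; simp
  | cons q rest ih =>
    intro d i hval
    rw [List.foldl_cons, ih _ i (fun r hr => hval r (List.mem_cons_of_mem _ hr))]
    by_cases hm : i ∈ rest.map (·.2)
    · simp [hm]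
    · rw [if_neg hm, PySem.Dict.get?_insert]
      by_cases hiq : i = q.2
      · rw [if_pos hiq, hval q (List.mem_cons_self ..)]
        simp [hiq]
      · simp [hiq, hm]

-- the final piece map holds pvEmit for every in-range position
lemma pvPiece_get? (words : List String) : ∀ (ws : List String) (d : PySem.Dict Int String)
    (i : Nat), i < words.length →
    (ws.foldl (fun (d : PySem.Dict Int String) w =>
      (PySem.List.enumerate (((PySem.List.enumerate words 0).filter (fun p => p.2 == w)).map (·.1)) 0).foldl
        (fun d q => d.insert q.2 (if q.1 = 0 then w ++ " " else w ++ "_" ++ PySem.Int.toStr q.1 ++ " ")) d) d).get? (i : Int)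
    = if words.getD i "" ∈ ws then some (pvEmit (words.take i) (words.getD i "")) else d.get? (i : Int) := by
  intro ws
  induction ws with
  | nil => intro d i _; simp
  | cons w rest ih =>
    intro d i hi
    rw [List.foldl_cons, ih _ i hi]
    have hidxs : ((PySem.List.enumerate words 0).filter (fun p => p.2 == w)).map (·.1)
        = (pvOcc words w).map (fun (j : Nat) => (j : Int)) := by
      rw [pvIdxs_eq w words 0]
      apply List.map_congr_left
      intro j _; ring
    rw [hidxs]
    have hval : ∀ q ∈ PySem.List.enumerate ((pvOcc words w).map (fun (j : Nat) => (j : Int))) 0,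
        (if q.1 = 0 then w ++ " " else w ++ "_" ++ PySem.Int.toStr q.1 ++ " ")
          = (fun j => pvEmit (words.take j.toNat) (words.getD j.toNat "")) q.2 := by
      intro q hq
      rw [PySem.List.mem_enumerate_iff] at hq
      obtain ⟨k, hk, hq⟩ := hq
      subst hq
      rw [List.length_map] at hk
      have hj : (pvOcc words w)[k]? = some ((pvOcc words w)[k]'hk) := List.getElem?_eq_getElem hk
      obtain ⟨h1, h2⟩ := pvOcc_spec w words k _ hj
      simp only [List.getElem_map, zero_add, Int.toNat_natCast]
      rw [h1]
      unfold pvEmit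
      rw [h2]
      by_cases hk0 : k = 0
      · simp [hk0]
      · simp [hk0, Int.natCast_eq_zero]
    rw [pvFoldlInsert_get? (fun j => pvEmit (words.take j.toNat) (words.getD j.toNat ""))
      _ _ d (i : Int) hval]
    rw [PySem.List.map_snd_enumerate]
    have hmem : ((i : Nat) : Int) ∈ (pvOcc words w).map (fun (j : Nat) => (j : Int)) ↔ i ∈ pvOcc words w := by
      simp
    simp only [List.mem_cons, Int.toNat_natCast]
    by_cases hw : words.getD i "" = w
    · have hin : i ∈ pvOcc words w := (pvOcc_mem w words i).2 ⟨hi, hw⟩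
      rw [if_pos (hmem.2 hin), if_pos (Or.inl hw)]
      split_ifs <;> rfl
    · have hnin : i ∉ pvOcc words w := fun h => hw ((pvOcc_mem w words i).1 h).2
      rw [if_neg (fun h => hnin (hmem.1 h))]
      by_cases hr : words.getD i "" ∈ rest
      · rw [if_pos hr, if_pos (Or.inr hr)]
      · rw [if_neg hr, if_neg (by tauto)]

-- ===== VERDICT (by name: the statement is the Claim_ definition above) =====
theorem get_symb_spec : Claim_equal_get_symb := by
  intro s _
  unfold Spec_get_symb get_symb get_symb_alt
  rw [pvA_loop _ [] PySem.Dict.empty "" (by simp) (by simp)]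
  rw [pvSpecFold_eq]
  simp only [List.nil_append, String.empty_append]
  -- rewrite B's range over Ints to a range over Nats
  rw [show PySem.List.pyRange 0 ((PySem.Str.split₀ s).length : Int) 1
        = (List.range (PySem.Str.split₀ s).length).map (fun k => ((k : Nat) : Int)) from by
      rw [PySem.List.pyRange_one]; simp]
  rw [List.map_map]
  congr 1
  apply List.map_congr_left
  intro k hk
  rw [List.mem_range] at hk
  simp only [Function.comp]
  rw [PySem.Dict.getD_eq_get?_getD,
    pvPiece_get? (PySem.Str.split₀ s) (PySem.List.dedup (PySem.Str.split₀ s)) PySem.Dict.empty k hk]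
  have hm : (PySem.Str.split₀ s).getD k "" ∈ PySem.List.dedup (PySem.Str.split₀ s) := by
    rw [PySem.List.mem_dedup]
    rw [List.getD_eq_getElem _ _ hk]
    exact List.getElem_mem hk
  rw [if_pos hm]
  simp
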